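-- pv_equiv track=rewrite | github.com/rohithpala/Python | NPTEL/Week 4/min_max_frequency_list.py | min_max_frequency_list
-- ===== SOURCE A (Python) =====
-- def min_max_frequency_list(lst):
--     freq = {}
--     for num in lst:
--         freq[num] = freq.get(num, 0) + 1
--     minimum, maximum = min(freq.values()), max(freq.values())
--     min_freq_list = []
--     max_freq_list = []
--     for key in freq.keys():
--         if freq[key] == minimum:
--             min_freq_list.append(key)
--         if freq[key] == maximum:
--             max_freq_list.append(key)
--     res = (sorted(min_freq_list), sorted(max_freq_list))
--     return res
-- ===== SOURCE B (Python) =====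
-- def min_max_frequency_list(lst):
--     freq = {}
--     for num in lst:
--         freq[num] = freq.get(num, 0) + 1
--     groups = {}
--     for key, cnt in freq.items():
--         groups.setdefault(cnt, []).append(key)
--     return (sorted(groups[min(groups)]), sorted(groups[max(groups)]))
-- ===== Notes on version B (the rewrite author's own statement) =====
-- stated objective: alternative
-- what changed: Replaces A's explicit two-condition scan over the keys with an inverted index (frequency -> list of keys, built via setdefault/append) and direct lookups of the min/max frequency group, taking min/max over the group keys instead of over the values.
import Mathlib
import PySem

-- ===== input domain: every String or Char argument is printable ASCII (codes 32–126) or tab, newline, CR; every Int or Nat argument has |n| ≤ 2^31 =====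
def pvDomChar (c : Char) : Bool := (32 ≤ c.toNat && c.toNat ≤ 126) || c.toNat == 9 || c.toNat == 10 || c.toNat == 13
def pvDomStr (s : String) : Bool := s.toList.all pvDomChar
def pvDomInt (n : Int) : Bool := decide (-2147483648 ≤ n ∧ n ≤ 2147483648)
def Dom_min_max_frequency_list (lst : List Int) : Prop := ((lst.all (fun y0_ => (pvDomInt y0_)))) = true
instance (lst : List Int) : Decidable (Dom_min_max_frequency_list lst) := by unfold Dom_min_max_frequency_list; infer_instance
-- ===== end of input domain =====

-- B replaces A's two-condition scan over the keys by an inverted index (frequency -> keys) with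
-- direct min/max-group lookups; objective: alternative decomposition, same cost.

-- ===== PORT A =====
def min_max_frequency_list (lst : List Int) : List Int × List Int :=
  let freq := lst.foldl (fun d num => d.insert num (d.getD num 0 + 1)) (PySem.Dict.empty : PySem.Dict Int Int)
  match PySem.List.min? freq.values (fun v => v), PySem.List.max? freq.values (fun v => v) with
  | some minimum, some maximum =>
    -- freq[key] is exact as getD key 0 here: key is drawn from freq.keys
    let p := freq.keys.foldl (fun (p : List Int × List Int) key =>
      (if freq.getD key 0 = minimum then p.1 ++ [key] else p.1,
       if freq.getD key 0 = maximum then p.2 ++ [key] else p.2)) ([], [])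
    (PySem.List.sorted p.1 (fun x => x) false, PySem.List.sorted p.2 (fun x => x) false)
  | _, _ => ([], [])  -- unreachable under Pre_: Python's min/max raise ValueError on empty lst

-- ===== PORT B =====
def min_max_frequency_list_alt (lst : List Int) : List Int × List Int :=
  let freq := lst.foldl (fun d num => d.insert num (d.getD num 0 + 1)) (PySem.Dict.empty : PySem.Dict Int Int)
  let groups := freq.items.foldl (fun g kv => g.modify kv.2 [] (· ++ [kv.1])) (PySem.Dict.empty : PySem.Dict Int (List Int))
  match PySem.List.min? groups.keys (fun v => v) with
  | none => ([], [])  -- unreachable under Pre_: Python's min raises ValueError on empty lst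
  | some m =>
    match PySem.List.max? groups.keys (fun v => v) with
    | none => ([], [])
    | some M =>
      -- groups[min(groups)]: the looked-up key comes from groups, so getD _ [] is exact
      (PySem.List.sorted (groups.getD m []) (fun x => x) false,
       PySem.List.sorted (groups.getD M []) (fun x => x) false)

-- ===== PRECONDITION & SPEC =====
-- Pre_ excludes only the empty list, on which Python A raises ValueError (min() of an empty sequence).
def Pre_min_max_frequency_list (lst : List Int) : Prop := lst ≠ []
instance (lst : List Int) : Decidable (Pre_min_max_frequency_list lst) := by
  unfold Pre_min_max_frequency_list; infer_instance
def pvWitness_min_max_frequency_list : List Int := [1, 2, 2]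

def Spec_min_max_frequency_list (lst : List Int) (out : List Int × List Int) : Prop := out = min_max_frequency_list_alt lst
instance (lst : List Int) (out : List Int × List Int) : Decidable (Spec_min_max_frequency_list lst out) := by unfold Spec_min_max_frequency_list; infer_instance

-- ===== CLAIM (what is proved, stated in full; the proofs are below) =====
def Claim_equal_min_max_frequency_list : Prop := ∀ (lst : List Int), Dom_min_max_frequency_list lst → Pre_min_max_frequency_list lst → Spec_min_max_frequency_list lst (min_max_frequency_list lst)

-- ===== LEMMAS AND PROOFS =====

-- min/max over the deduplicated list (a Set) = min/max over the original list (identity key, Int).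
lemma min?_ofList_id (xs : List Int) :
    PySem.List.min? (PySem.Set.ofList xs) (fun v => v) = PySem.List.min? xs (fun v => v) := by
  cases h1 : PySem.List.min? (PySem.Set.ofList xs) (fun v : Int => v) with
  | none =>
      rw [PySem.List.min?_eq_none_iff] at h1
      cases h2 : PySem.List.min? xs (fun v : Int => v) with
      | none => rfl
      | some m =>
          have hm : m ∈ PySem.Set.ofList xs := by
            rw [PySem.Set.mem_ofList]; exact PySem.List.min?_mem h2
          rw [h1] at hm; simp at hm
  | some m =>
      have hm' : m ∈ xs := by
        have := PySem.List.min?_mem h1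
        rwa [PySem.Set.mem_ofList] at this
      have hmin := PySem.List.min?_isMin h1
      cases h2 : PySem.List.min? xs (fun v : Int => v) with
      | none =>
          rw [PySem.List.min?_eq_none_iff] at h2
          rw [h2] at hm'; simp at hm'
      | some m2 =>
          have hm2 : m2 ∈ PySem.Set.ofList xs := by
            rw [PySem.Set.mem_ofList]; exact PySem.List.min?_mem h2
          exact congrArg some (le_antisymm (hmin m2 hm2) (PySem.List.min?_isMin h2 m hm'))

lemma max?_ofList_id (xs : List Int) :
    PySem.List.max? (PySem.Set.ofList xs) (fun v => v) = PySem.List.max? xs (fun v => v) := by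
  cases h1 : PySem.List.max? (PySem.Set.ofList xs) (fun v : Int => v) with
  | none =>
      rw [PySem.List.max?_eq_none_iff] at h1
      cases h2 : PySem.List.max? xs (fun v : Int => v) with
      | none => rfl
      | some m =>
          have hm : m ∈ PySem.Set.ofList xs := by
            rw [PySem.Set.mem_ofList]; exact PySem.List.max?_mem h2
          rw [h1] at hm; simp at hm
  | some m =>
      have hm' : m ∈ xs := by
        have := PySem.List.max?_mem h1
        rwa [PySem.Set.mem_ofList] at this
      have hmax := PySem.List.max?_isMax h1
      cases h2 : PySem.List.max? xs (fun v : Int => v) with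
      | none =>
          rw [PySem.List.max?_eq_none_iff] at h2
          rw [h2] at hm'; simp at hm'
      | some m2 =>
          have hm2 : m2 ∈ PySem.Set.ofList xs := by
            rw [PySem.Set.mem_ofList]; exact PySem.List.max?_mem h2
          exact congrArg some (le_antisymm (PySem.List.max?_isMax h2 m hm') (hmax m2 hm2))

-- the grouping fold, read back at c, is the keys whose value is c, in items order
lemma group_getD (l : List (Int × Int)) (c : Int) :
    (l.foldl (fun g kv => g.modify kv.2 [] (· ++ [kv.1])) (PySem.Dict.empty : PySem.Dict Int (List Int))).getD c []
      = (l.filter (fun p => p.2 == c)).map Prod.fst := by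
  have h : l.foldl (fun g kv => g.modify kv.2 [] (· ++ [kv.1])) (PySem.Dict.empty : PySem.Dict Int (List Int))
      = (l.map Prod.swap).foldl (fun g p => g.modify p.1 [] (· ++ [p.2])) PySem.Dict.empty := by
    rw [List.foldl_map]; simp
  rw [h, PySem.Dict.getD_foldl_modify_append]
  simp [List.filter_map, Function.comp_def, List.map_map]

-- the grouping fold's keys are the distinct values of l, in first-occurrence order
lemma group_keys (l : List (Int × Int)) :
    (l.foldl (fun g kv => g.modify kv.2 [] (· ++ [kv.1])) (PySem.Dict.empty : PySem.Dict Int (List Int))).keys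
      = PySem.Set.ofList (l.map Prod.snd) := by
  rw [PySem.Dict.keys_foldl_modify_key (key := Prod.snd) (d0 := []) (f := fun _ kv => (· ++ [kv.1]))]
  simp [PySem.Dict.keys_empty, PySem.Set.update, PySem.Set.ofList_eq_foldl]

-- A's key scan, as a filter of the items
lemma scan_filter (d : PySem.Dict Int Int) (hnd : d.keys.Nodup) (c : Int) :
    d.keys.filter (fun k => decide (d.getD k 0 = c))
      = (d.items.filter (fun p => p.2 == c)).map Prod.fst := by
  rw [PySem.Dict.items_eq_map_keys d hnd 0]
  rw [List.filter_map]
  simp only [Function.comp_def, List.map_map, List.map_id']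
  symm
  apply List.filter_congr
  intro k _
  rfl

lemma nodup_freq (lst : List Int) :
    (lst.foldl (fun d num => d.insert num (d.getD num 0 + 1)) (PySem.Dict.empty : PySem.Dict Int Int)).keys.Nodup :=
  PySem.Dict.nodup_keys_foldl_insert lst _ _ PySem.Dict.nodup_keys_empty

-- ===== VERDICT (by name: the statement is the Claim_ definition above) =====
theorem min_max_frequency_list_spec : Claim_equal_min_max_frequency_list := by
  intro lst _ _
  unfold Spec_min_max_frequency_list min_max_frequency_list min_max_frequency_list_alt
  simp only []
  set freq := lst.foldl (fun d num => d.insert num (d.getD num 0 + 1)) (PySem.Dict.empty : PySem.Dict Int Int) with hfreq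
  have hvals : freq.values = freq.items.map Prod.snd := by
    simp [PySem.Dict.values]
  have hkeysg :
      (freq.items.foldl (fun g kv => g.modify kv.2 [] (· ++ [kv.1])) (PySem.Dict.empty : PySem.Dict Int (List Int))).keys
        = PySem.Set.ofList (freq.items.map Prod.snd) := group_keys _
  have hmin : PySem.List.min?
        (freq.items.foldl (fun g kv => g.modify kv.2 [] (· ++ [kv.1])) (PySem.Dict.empty : PySem.Dict Int (List Int))).keys
        (fun v => v) = PySem.List.min? freq.values (fun v => v) := by
    rw [hkeysg, min?_ofList_id, hvals]
  have hmax : PySem.List.max?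
        (freq.items.foldl (fun g kv => g.modify kv.2 [] (· ++ [kv.1])) (PySem.Dict.empty : PySem.Dict Int (List Int))).keys
        (fun v => v) = PySem.List.max? freq.values (fun v => v) := by
    rw [hkeysg, max?_ofList_id, hvals]
  rw [hmin, hmax]
  cases h1 : PySem.List.min? freq.values (fun v => v) with
  | none => rfl
  | some minimum =>
    cases h2 : PySem.List.max? freq.values (fun v => v) with
    | none => rfl
    | some maximum =>
      dsimp only
      rw [PySem.List.foldl_prod_mk
        (f := fun acc key => if freq.getD key 0 = minimum then acc ++ [key] else acc)
        (g := fun acc key => if freq.getD key 0 = maximum then acc ++ [key] else acc)]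
      rw [PySem.List.foldl_append_ite_eq_filter, PySem.List.foldl_append_ite_eq_filter]
      rw [group_getD, group_getD]
      rw [scan_filter freq (nodup_freq lst) minimum, scan_filter freq (nodup_freq lst) maximum]
      simp
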